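-- pv_equiv track=rewrite | github.com/nickovic/rtamt | rtamt/explanation/ltl/discrete_time/explanations.py | explain_sat_implies
-- ===== SOURCE A (Python) =====
-- def explain_sat_implies(op1_signal, op2_signal, intervals):
--     op1_intervals = []
--     op2_intervals = []
--     for begin, end in intervals:
--         op1_state = False
--         op2_state = False
--         for i in range(begin, end+1):
--             if not op1_state and op1_signal[i] < 0:
--                     op1_state = True
--                     op1_start = i
--             elif op1_state and op1_signal[i] >= 0:
--                     op1_state = False
--                     op1_intervals.append([op1_start, i - 1])
--
--             if not op2_state and op2_signal[i] >= 0: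
--                     op2_state = True
--                     op2_start = i
--             elif op2_state and op2_signal[i] < 0:
--                     op2_state = False
--                     op2_intervals.append([op2_start, i - 1])
--         if op1_state:
--             op1_intervals.append([op1_start, i])
--         if op2_state:
--             op2_intervals.append([op2_start, i])
--
--     return op1_intervals, op2_intervals
-- ===== SOURCE B (Python) =====
-- def explain_sat_implies(op1_signal, op2_signal, intervals):
--     def runs(sig, begin, end, neg):
--         kept = [i for i in range(begin, end + 1) if (sig[i] < 0) == neg]
--         out = []
--         for i in kept:
--             if out and out[-1][1] == i - 1:
--                 out[-1][1] = i
--             else: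
--                 out.append([i, i])
--         return out
--
--     op1_intervals = []
--     op2_intervals = []
--     for begin, end in intervals:
--         op1_intervals += runs(op1_signal, begin, end, True)
--         op2_intervals += runs(op2_signal, begin, end, False)
--     return op1_intervals, op2_intervals
-- ===== Notes on version B (the rewrite author's own statement) =====
-- stated objective: idiomatic
-- what changed: Replaces the interleaved two-flag state machine with a per-signal pass: filter the indices where the sign predicate holds, then merge consecutive indices into maximal runs.
import Mathlib
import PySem

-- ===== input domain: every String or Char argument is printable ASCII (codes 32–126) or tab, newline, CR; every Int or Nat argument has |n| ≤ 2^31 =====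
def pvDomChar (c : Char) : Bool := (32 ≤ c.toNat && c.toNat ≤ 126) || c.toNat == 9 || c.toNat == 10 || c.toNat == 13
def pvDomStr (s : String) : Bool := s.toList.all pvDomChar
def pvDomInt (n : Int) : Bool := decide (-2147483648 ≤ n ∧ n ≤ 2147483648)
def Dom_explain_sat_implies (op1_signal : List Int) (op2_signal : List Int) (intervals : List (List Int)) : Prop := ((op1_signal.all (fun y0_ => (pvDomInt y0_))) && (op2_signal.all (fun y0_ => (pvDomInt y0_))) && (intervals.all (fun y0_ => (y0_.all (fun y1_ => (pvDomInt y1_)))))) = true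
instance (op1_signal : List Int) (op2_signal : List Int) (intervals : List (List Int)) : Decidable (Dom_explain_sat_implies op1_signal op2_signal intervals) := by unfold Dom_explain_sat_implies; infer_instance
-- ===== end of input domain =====

-- B replaces A's interleaved two-flag state machine by a per-signal filter-then-merge-runs pass (idiomatic; same cost).

-- ===== PORT A =====
-- the body of A's inner loop over i (both flag blocks, exactly as in the Python)
def pvStepA (op1_signal : List Int) (op2_signal : List Int)
    (t : Bool × Int × Bool × Int × List (List Int) × List (List Int)) (i : Int) :
    Bool × Int × Bool × Int × List (List Int) × List (List Int) :=
  match t with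
  | (st1, s1, st2, s2, a1, a2) =>
    let r1 :=
      if !st1 && decide (PySem.List.pyGetD op1_signal i 0 < 0) then (true, i, a1)
      else if st1 && decide (PySem.List.pyGetD op1_signal i 0 ≥ 0) then
        (false, s1, a1 ++ [[s1, i - 1]])
      else (st1, s1, a1)
    let r2 :=
      if !st2 && decide (PySem.List.pyGetD op2_signal i 0 ≥ 0) then (true, i, a2)
      else if st2 && decide (PySem.List.pyGetD op2_signal i 0 < 0) then
        (false, s2, a2 ++ [[s2, i - 1]])
      else (st2, s2, a2)
    (r1.1, r1.2.1, r2.1, r2.2.1, r1.2.2, r2.2.2)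

def explain_sat_implies (op1_signal : List Int) (op2_signal : List Int) (intervals : List (List Int)) : List (List Int) × List (List Int) :=
  intervals.foldl (fun acc iv =>
    match iv with
    | [b, e] =>
      let r := (PySem.List.pyRange b (e + 1) 1).foldl (pvStepA op1_signal op2_signal)
        (false, 0, false, 0, acc.1, acc.2)
      match r with
      | (st1, s1, st2, s2, a1, a2) =>
        (if st1 then a1 ++ [[s1, e]] else a1, if st2 then a2 ++ [[s2, e]] else a2)
    | _ => acc) ([], [])

-- ===== PORT B =====
-- the predicate '(signal[i] < 0) == neg'
def pvKeep (signal : List Int) (neg : Bool) (i : Int) : Bool :=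
  decide (PySem.List.pyGetD signal i 0 < 0) == neg

-- one step of B's run-merging loop: extend the last run if i is adjacent, else start [i, i]
def pvMerge (out : List (List Int)) (i : Int) : List (List Int) :=
  if out.isEmpty then out ++ [[i, i]]
  else if (out.getLastD []).getLast! = i - 1 then out.dropLast ++ [[(out.getLastD []).headI, i]]
  else out ++ [[i, i]]

def pvRuns (signal : List Int) (b e : Int) (neg : Bool) : List (List Int) :=
  ((PySem.List.pyRange b (e + 1) 1).filter (pvKeep signal neg)).foldl pvMerge []

-- B's per-interval step: extend both result lists with that interval's runs
def pvStepB (op1_signal : List Int) (op2_signal : List Int)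
    (acc : List (List Int) × List (List Int)) (iv : List Int) :
    List (List Int) × List (List Int) :=
  if iv.length = 2 then
    (acc.1 ++ pvRuns op1_signal iv.headI iv.getLast! true,
     acc.2 ++ pvRuns op2_signal iv.headI iv.getLast! false)
  else acc

def explain_sat_implies_alt (op1_signal : List Int) (op2_signal : List Int) (intervals : List (List Int)) : List (List Int) × List (List Int) :=
  intervals.foldl (pvStepB op1_signal op2_signal) ([], [])

-- ===== PRECONDITION & SPEC =====
-- Pre_ excludes exactly the inputs where the Python A raises: an interval that is not a
-- two-element list (unpack ValueError), or an index in some range(begin, end+1) that is out of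
-- range for either signal (IndexError; negative in-range indices wrap and are admitted).
def Pre_explain_sat_implies (op1_signal : List Int) (op2_signal : List Int) (intervals : List (List Int)) : Prop :=
  ∀ iv ∈ intervals, iv.length = 2 ∧
    ∀ i ∈ PySem.List.pyRange iv.headI (iv.getLast! + 1) 1,
      PySem.Raise.InRange op1_signal.length i ∧ PySem.Raise.InRange op2_signal.length i
instance (op1_signal : List Int) (op2_signal : List Int) (intervals : List (List Int)) : Decidable (Pre_explain_sat_implies op1_signal op2_signal intervals) := by unfold Pre_explain_sat_implies; infer_instance
def pvWitness_explain_sat_implies : List Int × List Int × List (List Int) := ([-1, 2, -3], [0, -3, 1], [[0, 2], [1, 1]])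

def Spec_explain_sat_implies (op1_signal : List Int) (op2_signal : List Int) (intervals : List (List Int)) (out : List (List Int) × List (List Int)) : Prop := out = explain_sat_implies_alt op1_signal op2_signal intervals
instance (op1_signal : List Int) (op2_signal : List Int) (intervals : List (List Int)) (out : List (List Int) × List (List Int)) : Decidable (Spec_explain_sat_implies op1_signal op2_signal intervals out) := by unfold Spec_explain_sat_implies; infer_instance

-- ===== CLAIM (what is proved, stated in full; the proofs are below) =====
def Claim_equal_explain_sat_implies : Prop := ∀ (op1_signal : List Int) (op2_signal : List Int) (intervals : List (List Int)), Dom_explain_sat_implies op1_signal op2_signal intervals → Pre_explain_sat_implies op1_signal op2_signal intervals → Spec_explain_sat_implies op1_signal op2_signal intervals (explain_sat_implies op1_signal op2_signal intervals)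

-- ===== LEMMAS AND PROOFS =====

-- A's machine restricted to one signal, with predicate pvKeep
def pvM (signal : List Int) (neg : Bool) (t : Bool × Int × List (List Int)) (i : Int) :
    Bool × Int × List (List Int) :=
  if !t.1 && pvKeep signal neg i then (true, i, t.2.2)
  else if t.1 && !pvKeep signal neg i then (false, t.2.1, t.2.2 ++ [[t.2.1, i - 1]])
  else t

lemma pvGeDecide (v : Int) : decide (v ≥ 0) = !decide (v < 0) := by
  by_cases h : v < 0
  · simp [h, not_le.mpr h]
  · simp [h, not_lt.mp h]

lemma pvStepA_split (op1_signal op2_signal : List Int)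
    (st1 st2 : Bool) (s1 s2 : Int) (a1 a2 : List (List Int)) (i : Int) :
    pvStepA op1_signal op2_signal (st1, s1, st2, s2, a1, a2) i =
      ((pvM op1_signal true (st1, s1, a1) i).1, (pvM op1_signal true (st1, s1, a1) i).2.1,
       (pvM op2_signal false (st2, s2, a2) i).1, (pvM op2_signal false (st2, s2, a2) i).2.1,
       (pvM op1_signal true (st1, s1, a1) i).2.2, (pvM op2_signal false (st2, s2, a2) i).2.2) := by
  simp only [pvStepA, pvM, pvKeep, pvGeDecide]
  cases hd1 : decide (PySem.List.pyGetD op1_signal i 0 < 0) <;>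
    cases hd2 : decide (PySem.List.pyGetD op2_signal i 0 < 0) <;>
      cases st1 <;> cases st2 <;> simp

lemma pvFold_split (op1_signal op2_signal : List Int) :
    ∀ (l : List Int) (st1 st2 : Bool) (s1 s2 : Int) (a1 a2 : List (List Int)),
    l.foldl (pvStepA op1_signal op2_signal) (st1, s1, st2, s2, a1, a2) =
      ((l.foldl (pvM op1_signal true) (st1, s1, a1)).1,
       (l.foldl (pvM op1_signal true) (st1, s1, a1)).2.1,
       (l.foldl (pvM op2_signal false) (st2, s2, a2)).1,
       (l.foldl (pvM op2_signal false) (st2, s2, a2)).2.1,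
       (l.foldl (pvM op1_signal true) (st1, s1, a1)).2.2,
       (l.foldl (pvM op2_signal false) (st2, s2, a2)).2.2) := by
  intro l
  induction l with
  | nil => intro _ _ _ _ _ _; rfl
  | cons i l ih =>
    intro st1 st2 s1 s2 a1 a2
    simp only [List.foldl_cons, pvStepA_split]
    rw [ih]

lemma pvMerge_eq (R : List (List Int)) (i x y : Int) (hR : R.getLast? = some [x, y]) :
    pvMerge R i = if y = i - 1 then R.dropLast ++ [[x, i]] else R ++ [[i, i]] := by
  have hne : R ≠ [] := by intro h; rw [h] at hR; simp at hR
  have hD : R.getLastD [] = [x, y] := by rw [List.getLastD_eq_getLast?, hR]; rfl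
  have h1 : ([x, y] : List Int).getLast! = y := rfl
  have h2 : ([x, y] : List Int).headI = x := rfl
  unfold pvMerge
  rw [if_neg (by simp [hne]), hD, h1, h2]

-- invariant relating A's machine state to B's run list at position a
def pvInv (st : Bool) (s a : Int) (R : List (List Int)) : Prop :=
  match R.getLast? with
  | none => st = false
  | some r => if st then r = [s, a - 1] else ∃ x y, r = [x, y] ∧ y < a - 1

lemma pvRun_eq (sig : List Int) (neg : Bool) :
    ∀ (n : Nat) (a c : Int), c = a + n →
    ∀ (st : Bool) (s : Int) (glob R : List (List Int)), pvInv st s a R →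
    (let r := (PySem.List.pyRange a c 1).foldl (pvM sig neg)
        (st, s, glob ++ (if st then R.dropLast else R));
     if r.1 then r.2.2 ++ [[r.2.1, c - 1]] else r.2.2)
      = glob ++ ((PySem.List.pyRange a c 1).filter (pvKeep sig neg)).foldl pvMerge R := by
  intro n
  induction n with
  | zero =>
    intro a c hc st s glob R hInv
    rw [PySem.List.pyRange_one_eq_nil (by omega)]
    simp only [List.foldl_nil, List.filter_nil]
    cases st with
    | false => simp
    | true =>
      simp only [pvInv] at hInv
      rcases hR : R.getLast? with _ | r
      · rw [hR] at hInv; simp at hInv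
      · rw [hR] at hInv
        replace hInv : r = [s, a - 1] := by simpa using hInv
        subst hInv
        have := List.dropLast_append_getLast? _ hR
        have hca : c - 1 = a - 1 := by omega
        simp [hca, List.append_assoc, this]
  | succ n ih =>
    intro a c hc st s glob R hInv
    rw [PySem.List.pyRange_one_cons (by omega : a < c)]
    simp only [List.foldl_cons, List.filter_cons]
    by_cases hk : pvKeep sig neg a = true <;> cases st
    · -- st = false, keep
      simp only [pvInv] at hInv
      have hmerge : pvMerge R a = R ++ [[a, a]] := by
        rcases hR : R.getLast? with _ | r
        · have h0 : R = [] := by simpa using hR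
          subst h0; rfl
        · rw [hR] at hInv
          simp only [if_neg (by simp : ¬ (false = true))] at hInv
          obtain ⟨x, y, rfl, hy⟩ := hInv
          rw [pvMerge_eq R a x y hR, if_neg (by omega : ¬ y = a - 1)]
      have hstep : pvM sig neg (false, s, glob ++ R) a = (true, a, glob ++ R) := by
        simp [pvM, hk]
      rw [if_neg (by simp : ¬ false = true), hstep, if_pos hk, List.foldl_cons, hmerge]
      have h2 := ih (a + 1) c (by omega) true a glob (R ++ [[a, a]])
        (by simp [pvInv])
      simp only [List.dropLast_concat] at h2
      simpa using h2
    · -- st = true, keep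
      simp only [pvInv] at hInv
      rcases hR : R.getLast? with _ | r
      · rw [hR] at hInv; simp at hInv
      · rw [hR] at hInv
        replace hInv : r = [s, a - 1] := by simpa using hInv
        subst hInv
        have hmerge : pvMerge R a = R.dropLast ++ [[s, a]] := by
          rw [pvMerge_eq R a s (a - 1) hR, if_pos rfl]
        have hstep : pvM sig neg (true, s, glob ++ R.dropLast) a
            = (true, s, glob ++ R.dropLast) := by
          simp [pvM, hk]
        rw [if_pos rfl, hstep, if_pos hk, List.foldl_cons, hmerge]
        have h2 := ih (a + 1) c (by omega) true s glob (R.dropLast ++ [[s, a]])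
          (by simp [pvInv])
        simp only [List.dropLast_concat] at h2
        simpa using h2
    · -- st = false, ¬keep
      simp only [pvInv] at hInv
      have hstep : pvM sig neg (false, s, glob ++ R) a = (false, s, glob ++ R) := by
        simp [pvM, hk]
      rw [if_neg (by simp : ¬ false = true), hstep, if_neg hk]
      have hInv' : pvInv false s (a + 1) R := by
        simp only [pvInv]
        rcases hR : R.getLast? with _ | r
        · trivial
        · rw [hR] at hInv
          simp only [if_neg (by simp : ¬ (false = true))] at hInv
          obtain ⟨x, y, rfl, hy⟩ := hInv
          simp only [if_neg (by simp : ¬ (false = true))]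
          exact ⟨x, y, rfl, by omega⟩
      have h2 := ih (a + 1) c (by omega) false s glob R hInv'
      simp only [if_neg (by simp : ¬ (false = true))] at h2
      simpa using h2
    · -- st = true, ¬keep
      simp only [pvInv] at hInv
      rcases hR : R.getLast? with _ | r
      · rw [hR] at hInv; simp at hInv
      · rw [hR] at hInv
        replace hInv : r = [s, a - 1] := by simpa using hInv
        subst hInv
        have hstep : pvM sig neg (true, s, glob ++ R.dropLast) a
            = (false, s, glob ++ R.dropLast ++ [[s, a - 1]]) := by
          simp [pvM, hk]
        rw [if_pos rfl, hstep, if_neg hk]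
        have hRa : glob ++ R.dropLast ++ [[s, a - 1]] = glob ++ R := by
          rw [List.append_assoc, List.dropLast_append_getLast? _ hR]
        rw [hRa]
        have hInv' : pvInv false s (a + 1) R := by
          simp only [pvInv, hR, if_neg (by simp : ¬ (false = true))]
          exact ⟨s, a - 1, rfl, by omega⟩
        have h2 := ih (a + 1) c (by omega) false s glob R hInv'
        simp only [if_neg (by simp : ¬ (false = true))] at h2
        simpa using h2

lemma pvInterval_eq (sig : List Int) (neg : Bool) (b e : Int) (acc : List (List Int)) :
    (let r := (PySem.List.pyRange b (e + 1) 1).foldl (pvM sig neg) (false, 0, acc);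
     if r.1 then r.2.2 ++ [[r.2.1, e]] else r.2.2) = acc ++ pvRuns sig b e neg := by
  by_cases h : b ≤ e + 1
  · have := pvRun_eq sig neg (e + 1 - b).toNat b (e + 1) (by omega) false 0 acc []
      (by simp [pvInv])
    simpa [pvRuns] using this
  · rw [PySem.List.pyRange_one_eq_nil (by omega)]
    simp [pvRuns, PySem.List.pyRange_one_eq_nil (by omega : e + 1 ≤ b)]

lemma pvOuter_eq (op1_signal op2_signal : List Int) :
    ∀ (ivs : List (List Int)) (acc : List (List Int) × List (List Int)),
    ivs.foldl (fun acc iv =>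
      match iv with
      | [b, e] =>
        let r := (PySem.List.pyRange b (e + 1) 1).foldl (pvStepA op1_signal op2_signal)
          (false, 0, false, 0, acc.1, acc.2)
        match r with
        | (st1, s1, st2, s2, a1, a2) =>
          (if st1 then a1 ++ [[s1, e]] else a1, if st2 then a2 ++ [[s2, e]] else a2)
      | _ => acc) acc =
    ivs.foldl (pvStepB op1_signal op2_signal) acc := by
  intro ivs
  induction ivs with
  | nil => intro _; rfl
  | cons iv ivs ih =>
    intro acc
    simp only [List.foldl_cons]
    rw [← ih]
    congr 1
    match iv with
    | [] => rfl
    | [_] => rfl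
    | x1 :: x2 :: x3 :: rest =>
      show _ = pvStepB op1_signal op2_signal acc (x1 :: x2 :: x3 :: rest)
      unfold pvStepB
      rw [if_neg (by simp only [List.length_cons]; omega)]
    | [b, e] =>
      show _ = pvStepB op1_signal op2_signal acc [b, e]
      unfold pvStepB
      rw [if_pos (show ([b, e] : List Int).length = 2 by simp)]
      have hh : ([b, e] : List Int).headI = b := rfl
      have hl : ([b, e] : List Int).getLast! = e := rfl
      rw [hh, hl]
      simp only [pvFold_split]
      have h1 := pvInterval_eq op1_signal true b e acc.1
      have h2 := pvInterval_eq op2_signal false b e acc.2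
      simp only at h1 h2
      simp [h1, h2]

-- ===== VERDICT (by name: the statement is the Claim_ definition above) =====
theorem explain_sat_implies_spec : Claim_equal_explain_sat_implies := by
  intro op1_signal op2_signal intervals _ _
  unfold Spec_explain_sat_implies explain_sat_implies explain_sat_implies_alt
  exact pvOuter_eq op1_signal op2_signal intervals ([], [])
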